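-- pv_equiv track=rewrite | github.com/EduardoSchiavo/AdventOfCode | 2023/day11.py | get_galaxies
-- ===== SOURCE A (Python) =====
-- def get_galaxies(points: list[list])-> dict:
--     galaxies = {}
--     down_shift=0
--     for ridx, row in enumerate(points):
--         if all(val == '.' for val in row):
--             down_shift+=1
--         for cidx, value in enumerate(row):
--             if value == '#':
--                 galaxies[(ridx+down_shift, cidx)]=value
--     return galaxies
-- ===== SOURCE B (Python) =====
-- def get_galaxies(points: list[list]) -> dict:
--     # Precompute prefix sums of fully-empty rows, then place each '#' directly.
--     prefix = [0]
--     for row in points: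
--         prefix.append(prefix[-1] + (1 if all(v == '.' for v in row) else 0))
--     return {(ridx + prefix[ridx], cidx): value
--             for ridx, row in enumerate(points)
--             for cidx, value in enumerate(row) if value == '#'}
-- ===== Notes on version B (the rewrite author's own statement) =====
-- stated objective: alternative
-- what changed: A's running down_shift accumulator interleaved with dict insertion is replaced by a separately precomputed prefix-sum array of empty rows, with the dict built in one comprehension that looks up each galaxy's shift as prefix[ridx].
import Mathlib
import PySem

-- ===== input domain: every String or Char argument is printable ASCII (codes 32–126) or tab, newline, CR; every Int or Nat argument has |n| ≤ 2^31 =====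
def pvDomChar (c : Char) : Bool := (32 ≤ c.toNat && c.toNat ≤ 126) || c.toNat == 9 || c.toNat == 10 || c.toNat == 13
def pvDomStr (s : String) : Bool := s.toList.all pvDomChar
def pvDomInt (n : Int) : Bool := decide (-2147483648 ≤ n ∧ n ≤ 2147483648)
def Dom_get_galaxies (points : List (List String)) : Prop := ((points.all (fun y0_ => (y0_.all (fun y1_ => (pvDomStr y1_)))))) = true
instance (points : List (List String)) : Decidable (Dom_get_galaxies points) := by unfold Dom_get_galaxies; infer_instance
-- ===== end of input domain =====

-- B replaces A's running down-shift accumulator by a precomputed prefix-sum of empty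
-- rows queried per galaxy (objective: alternative decomposition, same cost).

-- ===== PORT A =====
-- shared helper: `all(val == '.' for val in row)`
def pvAllDot (row : List String) : Bool := row.all (fun v => v == ".")

-- A's inner loop: `for cidx, value in enumerate(row): if value == '#': galaxies[...] = value`
def pvRowIns (ridx ds : Int) (row : List String)
    (g : PySem.Dict (Int × Int) String) : PySem.Dict (Int × Int) String :=
  (PySem.List.enumerate row).foldl
    (fun g q => if q.2 == "#" then g.insert (ridx + ds, q.1) q.2 else g) g

def get_galaxies (points : List (List String)) : List (Int × Int × String) :=
  let st := (PySem.List.enumerate points).foldl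
    (fun (st : PySem.Dict (Int × Int) String × Int) p =>
      let ds := if pvAllDot p.2 then st.2 + 1 else st.2
      (pvRowIns p.1 ds p.2 st.1, ds))
    (PySem.Dict.empty, 0)
  st.1.items.map (fun p => (p.1.1, p.1.2, p.2))

-- ===== PORT B =====
-- `prefix = [0]; for row in points: prefix.append(prefix[-1] + (1 if all(...) else 0))`
def pvPrefix (points : List (List String)) : List Int :=
  points.foldl (fun acc row => acc ++ [acc.getLastD 0 + (if pvAllDot row then 1 else 0)]) [0]

-- the dict comprehension's key/value stream, in generation order
def pvEntries (points : List (List String)) (pre : List Int) : List ((Int × Int) × String) :=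
  (PySem.List.enumerate points).flatMap (fun p =>
    (PySem.List.enumerate p.2).filterMap (fun q =>
      if q.2 == "#" then some ((p.1 + PySem.List.pyGetD pre p.1 0, q.1), q.2) else none))

def get_galaxies_alt (points : List (List String)) : List (Int × Int × String) :=
  ((pvEntries points (pvPrefix points)).foldl
     (fun (d : PySem.Dict (Int × Int) String) kv => d.insert kv.1 kv.2)
     PySem.Dict.empty).items.map (fun p => (p.1.1, p.1.2, p.2))

-- ===== PRECONDITION & SPEC =====
def Spec_get_galaxies (points : List (List String)) (out : List (Int × Int × String)) : Prop := out = get_galaxies_alt points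
instance (points : List (List String)) (out : List (Int × Int × String)) : Decidable (Spec_get_galaxies points out) := by unfold Spec_get_galaxies; infer_instance

-- ===== CLAIM (what is proved, stated in full; the proofs are below) =====
def Claim_equal_get_galaxies : Prop := ∀ (points : List (List String)), Dom_get_galaxies points → Spec_get_galaxies points (get_galaxies points)

-- ===== LEMMAS AND PROOFS =====

-- the entries one row contributes, at shift `sh`
def pvRowEnt (ridx sh : Int) (row : List String) : List ((Int × Int) × String) :=
  (PySem.List.enumerate row).filterMap
    (fun q => if q.2 == "#" then some ((ridx + sh, q.1), q.2) else none)

-- number of fully-empty rows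
def pvCountE (pts : List (List String)) : Int :=
  pts.foldl (fun c row => if pvAllDot row then c + 1 else c) 0

theorem pvFoldl_if_insert (ridx ds : Int) :
    ∀ (l : List (Int × String)) (g : PySem.Dict (Int × Int) String),
      l.foldl (fun g q => if q.2 == "#" then g.insert (ridx + ds, q.1) q.2 else g) g
      = (l.filterMap (fun q => if q.2 == "#" then some ((ridx + ds, q.1), q.2) else none)).foldl
          (fun d kv => d.insert kv.1 kv.2) g := by
  intro l
  induction l with
  | nil => intro g; rfl
  | cons q l ih =>
    intro g
    by_cases h : q.2 = "#"
    · rw [List.filterMap_cons_some (b := ((ridx + ds, q.1), q.2)) (by simp [h]), List.foldl_cons, List.foldl_cons,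
        if_pos (by simp [h] : (q.2 == "#") = true), ih]
    · rw [List.filterMap_cons_none (by simp [h]), List.foldl_cons,
        if_neg (by simp [h] : ¬ (q.2 == "#") = true), ih]

theorem pvRowIns_eq (ridx ds : Int) (row : List String) (g : PySem.Dict (Int × Int) String) :
    pvRowIns ridx ds row g = (pvRowEnt ridx ds row).foldl (fun d kv => d.insert kv.1 kv.2) g := by
  unfold pvRowIns pvRowEnt
  exact pvFoldl_if_insert ridx ds _ g

theorem pvRowEnt_allDot (ridx sh : Int) (row : List String) (h : pvAllDot row = true) :
    pvRowEnt ridx sh row = [] := by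
  apply List.filterMap_eq_nil_iff.mpr
  intro q hq
  rcases (PySem.List.mem_enumerate_iff _ _ _).mp hq with ⟨k, hk, rfl⟩
  have := (List.all_eq_true.mp h) _ (row.getElem_mem hk)
  simp_all

theorem pvCountE_append (pts : List (List String)) (row : List String) :
    pvCountE (pts ++ [row]) = pvCountE pts + (if pvAllDot row then 1 else 0) := by
  simp [pvCountE, List.foldl_append]
  split <;> simp

theorem pvPrefix_last (pts : List (List String)) :
    (pvPrefix pts).getLastD 0 = pvCountE pts := by
  induction pts using List.reverseRecOn with
  | nil => simp [pvPrefix, pvCountE]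
  | append_singleton pts row ih =>
    simp only [pvPrefix, List.foldl_append, List.foldl_cons, List.foldl_nil] at *
    rw [List.getLastD_concat, ih, pvCountE_append]

theorem pvPrefix_append (pts : List (List String)) (row : List String) :
    pvPrefix (pts ++ [row])
      = pvPrefix pts ++ [pvCountE pts + (if pvAllDot row then 1 else 0)] := by
  simp only [pvPrefix, List.foldl_append, List.foldl_cons, List.foldl_nil]
  rw [← pvPrefix_last]
  rfl

theorem pvPrefix_length (pts : List (List String)) :
    (pvPrefix pts).length = pts.length + 1 := by
  induction pts using List.reverseRecOn with
  | nil => rfl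
  | append_singleton pts row ih => simp [pvPrefix_append, ih]

theorem pvGetD_prefix_stable (pts : List (List String)) (row : List String) (k : Nat)
    (hk : k < pts.length) :
    PySem.List.pyGetD (pvPrefix (pts ++ [row])) (k : Int) 0
      = PySem.List.pyGetD (pvPrefix pts) (k : Int) 0 := by
  rw [pvPrefix_append]
  simp only [PySem.List.pyGetD_natCast, List.getD]
  rw [List.getElem?_append_left (by rw [pvPrefix_length]; omega)]

theorem pvGetD_prefix_last (pts : List (List String)) (row : List String) :
    PySem.List.pyGetD (pvPrefix (pts ++ [row])) (pts.length : Int) 0 = pvCountE pts := by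
  rw [pvPrefix_append]
  simp only [PySem.List.pyGetD_natCast, List.getD]
  rw [List.getElem?_append_left (by rw [pvPrefix_length]; omega)]
  have h := pvPrefix_last pts
  rw [List.getLastD_eq_getLast?, List.getLast?_eq_getElem?, pvPrefix_length] at h
  simpa using h

theorem pvFlatMap_congr {α β : Type} (l : List α) (f g : α → List β)
    (h : ∀ x ∈ l, f x = g x) : l.flatMap f = l.flatMap g := by
  induction l with
  | nil => rfl
  | cons x l ih =>
    simp only [List.flatMap_cons]
    rw [h x (by simp), ih (fun y hy => h y (by simp [hy]))]

theorem pvEntries_append (pts : List (List String)) (row : List String) :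
    pvEntries (pts ++ [row]) (pvPrefix (pts ++ [row]))
      = pvEntries pts (pvPrefix pts) ++ pvRowEnt (pts.length) (pvCountE pts) row := by
  unfold pvEntries
  rw [PySem.List.enumerate_append, List.flatMap_append]
  congr 1
  · apply pvFlatMap_congr
    intro p hp
    rcases (PySem.List.mem_enumerate_iff _ _ _).mp hp with ⟨k, hk, rfl⟩
    simp only
    rw [show ((0 : Int) + k) = (k : Int) by omega, pvGetD_prefix_stable pts row k hk]
  · simp only [PySem.List.enumerate, List.flatMap_cons, List.flatMap_nil, List.append_nil,
      pvRowEnt]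
    rw [show ((0 : Int) + pts.length) = (pts.length : Int) by omega,
      pvGetD_prefix_last pts row]

theorem pvMain (pts : List (List String)) :
    (PySem.List.enumerate pts).foldl
      (fun (st : PySem.Dict (Int × Int) String × Int) p =>
        let ds := if pvAllDot p.2 then st.2 + 1 else st.2
        (pvRowIns p.1 ds p.2 st.1, ds))
      (PySem.Dict.empty, 0)
    = ((pvEntries pts (pvPrefix pts)).foldl
        (fun d kv => d.insert kv.1 kv.2) PySem.Dict.empty,
       pvCountE pts) := by
  induction pts using List.reverseRecOn with
  | nil => rfl
  | append_singleton pts row ih =>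
    rw [PySem.List.enumerate_append, List.foldl_append, ih]
    simp only [PySem.List.enumerate, List.foldl_cons, List.foldl_nil]
    rw [pvEntries_append, List.foldl_append, pvCountE_append]
    by_cases h : pvAllDot row = true
    · rw [pvRowEnt_allDot _ _ _ h, pvRowIns_eq, pvRowEnt_allDot _ _ _ h]
      simp [h]
    · simp only [h, if_neg, Bool.false_eq_true, not_false_iff, Int.add_zero]
      rw [pvRowIns_eq]
      norm_num

-- ===== VERDICT (by name: the statement is the Claim_ definition above) =====
theorem get_galaxies_spec : Claim_equal_get_galaxies := by
  intro points _
  unfold Spec_get_galaxies get_galaxies get_galaxies_alt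
  rw [pvMain]
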